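-- pv_equiv track=rewrite | github.com/eddd33/D-mocratieParticipative | site/Traitement.py | traitement_parents
-- ===== SOURCE A (Python) =====
-- def traitement_parents(Y):    #Y est une liste de tuples dont le premier élément est la réponse à la question "Êtes vous parent?" et dont le second élément est le vote
--     oui=2*[0]                 #On crée 2 listes de longueur le nombre de catégories, dont le n-ième élément sera le nombre de votes (respectivement "Oui" et "Non") pour la n-ième situation
--     non=2*[0]
--     for k in range (len(Y)):  #On remplit les listes en lisant le vote et la situation familiale récoltés pour chaque votant
--         if Y[k][1]=='Oui':
--             if Y[k][0]=='oui':   #Si la réponse à "Êtes vous parent?" est "oui"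
--                 oui[0]+=1        #On ajoute un vote dans la liste oui en position 0
--             if Y[k][0]=='non':
--                 oui[1]+=1
--         if Y[k][1]=='Non':
--             if Y[k][0]=='oui':
--                 non[0]+=1
--             if Y[k][0]=='non':
--                 non[1]+=1
--     return oui,non
-- ===== SOURCE B (Python) =====
-- def traitement_parents(Y):
--     # Staged passes: each of the four cells is the number of occurrences of one
--     # (parent-answer, vote) pair, obtained with list.count; no accumulating loop.
--     oui = [Y.count(('oui', 'Oui')), Y.count(('non', 'Oui'))]
--     non = [Y.count(('oui', 'Non')), Y.count(('non', 'Non'))]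
--     return oui, non
-- ===== Notes on version B (the rewrite author's own statement) =====
-- stated objective: idiomatic
-- what changed: Replaces the single index loop with nested Yes/No branching and in-place list increments by four independent list.count passes, one per (parent, vote) pair, with no accumulator or branching at all.
import Mathlib
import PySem

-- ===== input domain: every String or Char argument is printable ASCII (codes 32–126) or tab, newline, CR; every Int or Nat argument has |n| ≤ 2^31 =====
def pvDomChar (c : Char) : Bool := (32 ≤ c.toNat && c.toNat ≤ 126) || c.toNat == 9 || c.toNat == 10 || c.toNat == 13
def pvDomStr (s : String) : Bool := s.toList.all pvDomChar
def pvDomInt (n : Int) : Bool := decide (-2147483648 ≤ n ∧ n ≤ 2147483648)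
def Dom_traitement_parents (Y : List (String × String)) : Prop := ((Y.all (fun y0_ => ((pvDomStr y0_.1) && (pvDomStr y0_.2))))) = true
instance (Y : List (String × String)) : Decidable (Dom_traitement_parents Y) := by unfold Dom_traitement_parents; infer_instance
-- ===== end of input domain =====

-- B (idiomatic): the one branching loop is replaced by four independent
-- list.count passes, one per (parent, vote) pair; no accumulator at all.

-- ===== PORT A =====
-- one iteration of A's for-body: nested ifs, in-place increments of the 2-lists
def pvStepA (st : List Int × List Int) (yk : String × String) : List Int × List Int :=
  let oui := st.1
  let non := st.2
  let oui := if yk.2 = "Oui" then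
               (if yk.1 = "oui" then PySem.List.pySetD oui 0 (PySem.List.pyGetD oui 0 0 + 1) else oui)
             else oui
  let oui := if yk.2 = "Oui" then
               (if yk.1 = "non" then PySem.List.pySetD oui 1 (PySem.List.pyGetD oui 1 0 + 1) else oui)
             else oui
  let non := if yk.2 = "Non" then
               (if yk.1 = "oui" then PySem.List.pySetD non 0 (PySem.List.pyGetD non 0 0 + 1) else non)
             else non
  let non := if yk.2 = "Non" then
               (if yk.1 = "non" then PySem.List.pySetD non 1 (PySem.List.pyGetD non 1 0 + 1) else non)
             else non
  (oui, non)

def traitement_parents (Y : List (String × String)) : List Int × List Int :=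
  let oui : List Int := List.replicate 2 0
  let non : List Int := List.replicate 2 0
  (PySem.List.pyRange 0 (Y.length : Int) 1).foldl
    (fun st k => pvStepA st (PySem.List.pyGetD Y k ("", ""))) (oui, non)

-- ===== PORT B =====
def traitement_parents_alt (Y : List (String × String)) : List Int × List Int :=
  ([(PySem.List.count Y ("oui", "Oui") : Int), (PySem.List.count Y ("non", "Oui") : Int)],
   [(PySem.List.count Y ("oui", "Non") : Int), (PySem.List.count Y ("non", "Non") : Int)])

-- ===== PRECONDITION & SPEC =====
def Spec_traitement_parents (Y : List (String × String)) (out : List Int × List Int) : Prop := out = traitement_parents_alt Y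
instance (Y : List (String × String)) (out : List Int × List Int) : Decidable (Spec_traitement_parents Y out) := by unfold Spec_traitement_parents; infer_instance

-- ===== CLAIM (what is proved, stated in full; the proofs are below) =====
def Claim_equal_traitement_parents : Prop := ∀ (Y : List (String × String)), Dom_traitement_parents Y → Spec_traitement_parents Y (traitement_parents Y)

-- ===== LEMMAS AND PROOFS =====

theorem pvA_foldl (Y : List (String × String)) (a b c d : Int) :
    Y.foldl pvStepA ([a, b], [c, d]) =
      ([a + (Y.count ("oui", "Oui") : Int), b + (Y.count ("non", "Oui") : Int)],
       [c + (Y.count ("oui", "Non") : Int), d + (Y.count ("non", "Non") : Int)]) := by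
  induction Y generalizing a b c d with
  | nil => simp
  | cons y Y ih =>
    obtain ⟨y1, y2⟩ := y
    simp only [List.foldl_cons, List.count_cons, pvStepA, PySem.List.pySetD,
      PySem.List.pySet?, PySem.List.pyGetD, PySem.List.pyGet?, PySem.List.pyIdx?]
    by_cases h2 : y2 = "Oui" <;> by_cases h1 : y1 = "oui" <;>
      by_cases h1' : y1 = "non" <;> by_cases h2' : y2 = "Non" <;>
      simp_all <;> ring

-- ===== VERDICT (by name: the statement is the Claim_ definition above) =====
theorem traitement_parents_spec : Claim_equal_traitement_parents := by
  intro Y _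
  unfold Spec_traitement_parents traitement_parents traitement_parents_alt
  rw [show (PySem.List.pyRange 0 (Y.length : Int) 1).foldl
        (fun st k => pvStepA st (PySem.List.pyGetD Y k ("", ""))) (List.replicate 2 0, List.replicate 2 0)
      = Y.foldl pvStepA ([0, 0], [0, 0]) from
    PySem.List.foldl_pyRange_zero_pyGetD' Y ("", "") pvStepA _]
  rw [pvA_foldl]
  simp [PySem.List.count]
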